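-- pv_equiv track=rewrite | github.com/H-P-Su/pdb-analysis | analyze_ligands.py | _find_rings_in_graph
-- ===== SOURCE A (Python) =====
-- def _find_rings_in_graph(adj: dict[int, set[int]],
--                           min_size: int = 5,
--                           max_size: int = 6) -> list[frozenset[int]]:
--     """Find unique rings of size min_size..max_size via DFS."""
--     found: set[frozenset[int]] = set()
--
--     def dfs(start: int, cur: int, path: list[int], visited: set[int]):
--         if len(path) > max_size:
--             return
--         for nbr in adj[cur]:
--             if nbr == start and min_size <= len(path) <= max_size:
--                 found.add(frozenset(path))
--             elif nbr not in visited: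
--                 visited.add(nbr)
--                 dfs(start, nbr, path + [nbr], visited)
--                 visited.remove(nbr)
--
--     for node in adj:
--         dfs(node, node, [node], {node})
--     return list(found)
-- ===== SOURCE B (Python) =====
-- def _find_rings_in_graph(adj: dict[int, set[int]],
--                           min_size: int = 5,
--                           max_size: int = 6) -> list[frozenset[int]]:
--     """Find unique rings of size min_size..max_size, iteratively.
--
--     The recursion is replaced by an explicit stack machine: each frame is
--     (path, pending-neighbors); one machine step consumes ONE neighbor of the
--     frame on top (so exploration order equals the recursive call order), the
--     path doubles as the visited set.  Frames are only created for paths of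
--     length <= max_size, so every scanned path may be ring-checked directly.
--     """
--     found: set[frozenset[int]] = set()
--     for node in adj:
--         if 1 <= max_size:
--             stack: list[tuple[list[int], list[int]]] = [([node], list(adj[node]))]
--             while stack:
--                 path, nbrs = stack.pop()
--                 if nbrs:
--                     nbr, rest = nbrs[0], nbrs[1:]
--                     stack.append((path, rest))
--                     if nbr == node and min_size <= len(path):
--                         found.add(frozenset(path))
--                     elif nbr != node and nbr not in path and len(path) < max_size:
--                         stack.append((path + [nbr], list(adj[nbr])))
--     return list(found)
-- ===== Notes on version B (the rewrite author's own statement) =====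
-- stated objective: alternative
-- what changed: The recursive DFS with a mutating closure over `found`/`visited` is replaced by an iterative stack machine: an explicit stack of (path, pending-neighbors) frames processed one neighbor per step inside a single while loop, with the path itself serving as the visited set and frames created only for paths of length <= max_size.
import Mathlib
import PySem

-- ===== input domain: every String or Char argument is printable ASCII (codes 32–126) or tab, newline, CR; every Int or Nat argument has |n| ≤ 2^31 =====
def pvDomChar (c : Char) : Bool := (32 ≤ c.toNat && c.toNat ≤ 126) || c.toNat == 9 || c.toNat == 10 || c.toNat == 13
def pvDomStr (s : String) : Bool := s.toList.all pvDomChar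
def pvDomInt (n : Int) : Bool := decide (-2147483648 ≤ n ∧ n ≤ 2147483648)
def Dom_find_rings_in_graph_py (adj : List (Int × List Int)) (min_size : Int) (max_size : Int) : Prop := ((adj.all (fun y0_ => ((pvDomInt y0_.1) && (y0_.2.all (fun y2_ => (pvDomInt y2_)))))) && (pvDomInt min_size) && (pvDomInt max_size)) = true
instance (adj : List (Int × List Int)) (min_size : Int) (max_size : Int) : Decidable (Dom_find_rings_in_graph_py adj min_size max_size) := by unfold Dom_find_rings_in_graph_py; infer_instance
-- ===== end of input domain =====

-- ===== PORT A =====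
-- B replaces A's recursive DFS (closure mutating `found`/`visited`) by an explicit stack
-- machine: one while loop over (path, pending-neighbors) frames, the path doubling as the
-- visited set. A mutates nothing observable; the outer order of Python's `list(found)` is
-- hash order and is compared as a set (both ports keep insertion order).
-- adj[cur] on the association list (first match; a missing key is a KeyError in Python,
-- excluded by Pre_, so the [] default is never the looked-up value under Pre_).
def pvAdjGet (adj : List (Int × List Int)) (k : Int) : List Int :=
  ((adj.find? (fun p => p.1 == k)).map Prod.snd).getD []

-- Body of A's `dfs` inlined at its call sites: dfs = length guard + loop over adj[cur].
def pvA_loop (adj : List (Int × List Int)) (min_size max_size start : Int)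
    (path : List Int) (visited : PySem.Set Int) (nbrs : List Int)
    (found : PySem.Set (List Int)) : PySem.Set (List Int) :=
  match nbrs with
  | [] => found
  | nbr :: rest =>
    if nbr == start && decide (min_size ≤ (path.length : Int) ∧ (path.length : Int) ≤ max_size) then
      pvA_loop adj min_size max_size start path visited rest
        (PySem.Set.add found (PySem.Set.ofList path))
    else if PySem.Set.contains visited nbr then
      pvA_loop adj min_size max_size start path visited rest found
    else
      pvA_loop adj min_size max_size start path visited rest
        (if _h : ((path ++ [nbr]).length : Int) > max_size then found
         else pvA_loop adj min_size max_size start (path ++ [nbr]) (PySem.Set.add visited nbr)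
                (pvAdjGet adj nbr) found)
termination_by ((max_size + 2 - (path.length : Int)).toNat, nbrs.length)
decreasing_by
  · exact Prod.Lex.right _ (Nat.lt_succ_self _)
  · exact Prod.Lex.right _ (Nat.lt_succ_self _)
  · apply Prod.Lex.left; simp only [List.length_append, List.length_singleton] at *; omega
  · exact Prod.Lex.right _ (Nat.lt_succ_self _)

def find_rings_in_graph_py (adj : List (Int × List Int)) (min_size : Int) (max_size : Int) : List (List Int) :=
  adj.foldl (fun found kv =>
      if (([kv.1] : List Int).length : Int) > max_size then found
      else pvA_loop adj min_size max_size kv.1 [kv.1] (PySem.Set.ofList [kv.1])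
             (pvAdjGet adj kv.1) found)
    PySem.Set.empty

-- ===== PORT B =====
-- Termination bookkeeping for the stack machine (not part of the algorithm): D bounds every
-- neighbor-list length, pvB_h d bounds the work of a frame with d length-budget left.
def pvB_D (adj : List (Int × List Int)) : Nat :=
  adj.foldr (fun p m => max p.2.length m) 0

lemma pvAdjGet_len_le (adj : List (Int × List Int)) (k : Int) :
    (pvAdjGet adj k).length ≤ pvB_D adj := by
  unfold pvAdjGet
  induction adj with
  | nil => simp [pvB_D]
  | cons p rest ih =>
    simp only [List.find?_cons, pvB_D, List.foldr_cons]
    by_cases h : (p.1 == k) = true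
    · simp [h]
    · simpa [h, pvB_D] using Nat.le_trans ih (Nat.le_max_right _ _)

def pvB_h (D : Nat) : Nat → Nat
  | 0 => 2
  | d + 1 => 2 + D * pvB_h D d

lemma pvB_h_ge_two (D d : Nat) : 2 ≤ pvB_h D d := by
  cases d <;> simp [pvB_h]

def pvB_wt (adj : List (Int × List Int)) (max_size : Int)
    (stk : List (List Int × List Int)) : Nat :=
  stk.foldr (fun fr acc =>
    fr.2.length * pvB_h (pvB_D adj) ((max_size - fr.1.length).toNat) + acc + 1) 0

-- B's while loop: pop a (path, pending-neighbors) frame, consume its first neighbor,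
-- push back the rest and possibly a child frame.
def pvB_machine (adj : List (Int × List Int)) (min_size max_size start : Int)
    (found : PySem.Set (List Int)) (stk : List (List Int × List Int)) :
    PySem.Set (List Int) :=
  match stk with
  | [] => found
  | (path, nbrs) :: stk' =>
    match nbrs with
    | [] => pvB_machine adj min_size max_size start found stk'
    | nbr :: rest =>
      if nbr == start && decide (min_size ≤ (path.length : Int)) then
        pvB_machine adj min_size max_size start
          (PySem.Set.add found (PySem.Set.ofList path)) ((path, rest) :: stk')
      else if nbr != start && !path.contains nbr && decide ((path.length : Int) < max_size) then
        pvB_machine adj min_size max_size start found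
          ((path ++ [nbr], pvAdjGet adj nbr) :: (path, rest) :: stk')
      else
        pvB_machine adj min_size max_size start found ((path, rest) :: stk')
termination_by pvB_wt adj max_size stk
decreasing_by
  · simp only [pvB_wt, List.foldr_cons, List.length_nil]; omega
  · simp only [pvB_wt, List.foldr_cons, List.length_cons]
    have hH := pvB_h_ge_two (pvB_D adj) ((max_size - (path.length : Int)).toNat)
    have hmul : (rest.length + 1) * pvB_h (pvB_D adj) ((max_size - (path.length : Int)).toNat)
        = rest.length * pvB_h (pvB_D adj) ((max_size - (path.length : Int)).toNat)
          + pvB_h (pvB_D adj) ((max_size - (path.length : Int)).toNat) := by ring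
    omega
  · rename_i hc2
    simp only [Bool.and_eq_true, bne_iff_ne, Bool.not_eq_true', decide_eq_true_eq] at hc2
    simp only [pvB_wt, List.foldr_cons, List.length_cons, List.length_append,
      List.length_nil, Nat.zero_add]
    have hd : (max_size - ((path.length : Nat) : Int)).toNat
        = (max_size - (((path.length + 1 : Nat)) : Int)).toNat + 1 := by
      have : (path.length : Int) < max_size := hc2.2
      omega
    have hbound := pvAdjGet_len_le adj nbr
    have hh : (pvAdjGet adj nbr).length
          * pvB_h (pvB_D adj) ((max_size - (((path.length + 1 : Nat)) : Int)).toNat) + 2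
        ≤ pvB_h (pvB_D adj) ((max_size - ((path.length : Nat) : Int)).toNat) := by
      rw [hd, pvB_h]
      have := Nat.mul_le_mul_right
        (pvB_h (pvB_D adj) ((max_size - (((path.length + 1 : Nat)) : Int)).toNat)) hbound
      omega
    have hmul : (rest.length + 1) * pvB_h (pvB_D adj) ((max_size - (path.length : Int)).toNat)
        = rest.length * pvB_h (pvB_D adj) ((max_size - (path.length : Int)).toNat)
          + pvB_h (pvB_D adj) ((max_size - (path.length : Int)).toNat) := by ring
    omega
  · simp only [pvB_wt, List.foldr_cons, List.length_cons]
    have hH := pvB_h_ge_two (pvB_D adj) ((max_size - (path.length : Int)).toNat)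
    have hmul : (rest.length + 1) * pvB_h (pvB_D adj) ((max_size - (path.length : Int)).toNat)
        = rest.length * pvB_h (pvB_D adj) ((max_size - (path.length : Int)).toNat)
          + pvB_h (pvB_D adj) ((max_size - (path.length : Int)).toNat) := by ring
    omega

def find_rings_in_graph_py_alt (adj : List (Int × List Int)) (min_size : Int) (max_size : Int) : List (List Int) :=
  adj.foldl (fun found kv =>
      if decide ((1 : Int) ≤ max_size) then
        pvB_machine adj min_size max_size kv.1 found [([kv.1], pvAdjGet adj kv.1)]
      else found)
    PySem.Set.empty

-- ===== PRECONDITION & SPEC =====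
-- Pre_ requires (a) distinct keys — an association list with duplicate keys does not represent
-- any Python dict — and (b) max_size ≤ 1 or every adjacency value a key of adj: exactly otherwise
-- A raises KeyError (with max_size ≤ 1 the length guard cuts every path before a missing key is
-- looked up).
def Pre_find_rings_in_graph_py (adj : List (Int × List Int)) (min_size : Int) (max_size : Int) : Prop :=
  (adj.map Prod.fst).Nodup ∧
  (max_size ≤ 1 ∨ ∀ p ∈ adj, ∀ v ∈ p.2, v ∈ adj.map Prod.fst)
instance (adj : List (Int × List Int)) (min_size : Int) (max_size : Int) : Decidable (Pre_find_rings_in_graph_py adj min_size max_size) := by unfold Pre_find_rings_in_graph_py; infer_instance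

def pvWitness_find_rings_in_graph_py : (List (Int × List Int)) × Int × Int :=
  ([(1, [2, 5]), (2, [1, 3]), (3, [2, 4]), (4, [3, 5]), (5, [4, 1])], 5, 6)

def Spec_find_rings_in_graph_py (adj : List (Int × List Int)) (min_size : Int) (max_size : Int) (out : List (List Int)) : Prop := out = find_rings_in_graph_py_alt adj min_size max_size
instance (adj : List (Int × List Int)) (min_size : Int) (max_size : Int) (out : List (List Int)) : Decidable (Spec_find_rings_in_graph_py adj min_size max_size out) := by unfold Spec_find_rings_in_graph_py; infer_instance

-- ===== CLAIM (what is proved, stated in full; the proofs are below) =====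
def Claim_equal_find_rings_in_graph_py : Prop := ∀ (adj : List (Int × List Int)) (min_size : Int) (max_size : Int), Dom_find_rings_in_graph_py adj min_size max_size → Pre_find_rings_in_graph_py adj min_size max_size → Spec_find_rings_in_graph_py adj min_size max_size (find_rings_in_graph_py adj min_size max_size)

-- ===== LEMMAS AND PROOFS =====

-- The machine invariant: every stacked frame carries a path of length ≤ max_size that starts
-- the ring search (start ∈ path); under it, running the machine equals folding A's
-- neighbor loop over the frames.
def pvInv (max_size start : Int) (fr : List Int × List Int) : Prop :=
  ((fr.1.length : Int) ≤ max_size) ∧ start ∈ fr.1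

lemma pv_machine_eq (adj : List (Int × List Int)) (min_size max_size start : Int)
    (found : PySem.Set (List Int)) (stk : List (List Int × List Int))
    (hinv : ∀ fr ∈ stk, pvInv max_size start fr) :
    pvB_machine adj min_size max_size start found stk
      = stk.foldl (fun f fr =>
          pvA_loop adj min_size max_size start fr.1 (PySem.Set.ofList fr.1) fr.2 f) found := by
  revert hinv
  induction found, stk using pvB_machine.induct adj min_size max_size start with
  | case1 found => intro _; simp [pvB_machine]
  | case2 found path stk' ih =>
    intro hinv
    rw [pvB_machine, List.foldl_cons]
    rw [ih (fun fr h => hinv fr (List.mem_cons_of_mem _ h))]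
    congr 1
    simp [pvA_loop]
  | case3 found path stk' nbr rest hc ih =>
    intro hinv
    obtain ⟨hlen, hst⟩ := hinv (path, nbr :: rest) (by simp)
    simp only [Bool.and_eq_true, beq_iff_eq, decide_eq_true_eq] at hc
    rw [pvB_machine, if_pos (by simp [hc.1, hc.2])]
    rw [ih (by
      intro fr h
      rcases List.mem_cons.mp h with h | h
      · exact h ▸ ⟨hlen, hst⟩
      · exact hinv fr (List.mem_cons_of_mem _ h))]
    rw [List.foldl_cons, List.foldl_cons]
    congr 1
    have hlen' : (path.length : Int) ≤ max_size := hlen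
    have hx : (nbr == start &&
        decide (min_size ≤ (path.length : Int) ∧ (path.length : Int) ≤ max_size)) = true := by
      simp only [Bool.and_eq_true, beq_iff_eq, decide_eq_true_eq]
      exact ⟨hc.1, hc.2, hlen'⟩
    simp only [pvA_loop]
    rw [if_pos hx]
  | case4 found path stk' nbr rest hc1 hc2 ih =>
    intro hinv
    obtain ⟨hlen, hst⟩ := hinv (path, nbr :: rest) (by simp)
    simp only [Bool.and_eq_true, bne_iff_ne, Bool.not_eq_true', decide_eq_true_eq] at hc2
    obtain ⟨⟨hne, hnmem⟩, hlt⟩ := hc2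
    have hnmem' : nbr ∉ path := by simpa [List.contains_eq_mem] using hnmem
    rw [pvB_machine, if_neg hc1, if_pos (by
      simp only [Bool.and_eq_true, bne_iff_ne, Bool.not_eq_true', decide_eq_true_eq]
      exact ⟨⟨hne, hnmem⟩, hlt⟩)]
    rw [ih (by
      intro fr h
      rcases List.mem_cons.mp h with h | h
      · subst h
        refine ⟨?_, List.mem_append_left _ hst⟩
        simp only [List.length_append, List.length_cons, List.length_nil]; push_cast; omega
      rcases List.mem_cons.mp h with h | h
      · exact h ▸ ⟨hlen, hst⟩
      · exact hinv fr (List.mem_cons_of_mem _ h))]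
    rw [List.foldl_cons, List.foldl_cons, List.foldl_cons]
    congr 1
    simp only [pvA_loop]
    rw [if_neg (by
        simp only [Bool.and_eq_true, beq_iff_eq, decide_eq_true_eq, not_and]
        intro h; exact absurd h hne),
      if_neg (by
        intro h
        exact hnmem' ((PySem.Set.mem_ofList _ _).mp ((PySem.Set.contains_iff _ _).mp h))),
      dif_neg (by
        simp only [List.length_append, List.length_cons, List.length_nil, gt_iff_lt, not_lt]
        push_cast; omega)]
    congr 1
    rw [PySem.Set.ofList_append_singleton]
  | case5 found path stk' nbr rest hc1 hc2 ih =>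
    intro hinv
    obtain ⟨hlen, hst⟩ := hinv (path, nbr :: rest) (by simp)
    rw [pvB_machine, if_neg hc1, if_neg hc2]
    rw [ih (by
      intro fr h
      rcases List.mem_cons.mp h with h | h
      · exact h ▸ ⟨hlen, hst⟩
      · exact hinv fr (List.mem_cons_of_mem _ h))]
    rw [List.foldl_cons, List.foldl_cons]
    congr 1
    simp only [Bool.and_eq_true, beq_iff_eq, decide_eq_true_eq, not_and] at hc1
    by_cases heq : nbr = start
    · -- nbr == start but min_size > len(path): A skips via the visited test (start ∈ path)
      simp only [pvA_loop]
      rw [if_neg (by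
          simp only [Bool.and_eq_true, beq_iff_eq, decide_eq_true_eq, not_and]
          intro h hmin
          exact (hc1 h hmin).elim),
        if_pos ((PySem.Set.contains_iff _ _).mpr
          ((PySem.Set.mem_ofList _ _).mpr (heq ▸ hst)))]
    · simp only [Bool.and_eq_true, bne_iff_ne, Bool.not_eq_true', decide_eq_true_eq,
        not_and] at hc2
      by_cases hmem : nbr ∈ path
      · simp only [pvA_loop]
        rw [if_neg (by simp [heq]),
          if_pos ((PySem.Set.contains_iff _ _).mpr ((PySem.Set.mem_ofList _ _).mpr hmem))]
      · -- nbr not in path and len(path) = max_size: A recurses into the length guard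
        have hnlt : ¬ (path.length : Int) < max_size :=
          hc2 ⟨heq, by simpa [List.contains_eq_mem] using hmem⟩
        simp only [pvA_loop]
        rw [if_neg (by simp [heq]),
          if_neg (by
            intro h
            exact hmem ((PySem.Set.mem_ofList _ _).mp ((PySem.Set.contains_iff _ _).mp h))),
          dif_pos (by
            simp only [List.length_append, List.length_cons, List.length_nil, gt_iff_lt]
            push_cast; omega)]

lemma pv_fold_eq (adj0 adj : List (Int × List Int)) (min_size max_size : Int)
    (found : PySem.Set (List Int)) :
    adj.foldl (fun found kv =>
        if (([kv.1] : List Int).length : Int) > max_size then found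
        else pvA_loop adj0 min_size max_size kv.1 [kv.1] (PySem.Set.ofList [kv.1])
               (pvAdjGet adj0 kv.1) found) found
      = adj.foldl (fun found kv =>
          if decide ((1 : Int) ≤ max_size) then
            pvB_machine adj0 min_size max_size kv.1 found [([kv.1], pvAdjGet adj0 kv.1)]
          else found) found := by
  induction adj generalizing found with
  | nil => rfl
  | cons kv rest ih =>
    rw [List.foldl_cons, List.foldl_cons, ih]
    congr 1
    by_cases h : (1 : Int) ≤ max_size
    · rw [if_neg (by simpa using h), if_pos (by simpa using h),
        pv_machine_eq adj0 min_size max_size kv.1 found _ (by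
          intro fr hfr
          rcases List.mem_cons.mp hfr with h' | h'
          · exact h' ▸ ⟨by simpa using h, by simp⟩
          · cases h'),
        List.foldl_cons, List.foldl_nil]
    · rw [if_pos (by simpa using not_le.mp h), if_neg (by simpa using h)]

-- ===== VERDICT (by name: the statement is the Claim_ definition above) =====
theorem find_rings_in_graph_py_spec : Claim_equal_find_rings_in_graph_py := by
  intro adj min_size max_size _ _
  unfold Spec_find_rings_in_graph_py find_rings_in_graph_py find_rings_in_graph_py_alt
  exact pv_fold_eq adj adj min_size max_size PySem.Set.empty
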